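-- pv_equiv track=rewrite | github.com/aditya-sengupta/misc | ProjectEuler/Q16.py | double_from_string
-- ===== SOURCE A (Python) =====
-- def reversed_string(a_string):
--     return a_string[::-1]
--
-- def double_from_string(num_str):
--     doubled_string = ''
--     carry = 0
--     num_str = reversed_string(num_str)
--     for i in num_str:
--         digit = 2*int(i) + carry
--         carry = int((digit - (digit%10))/10)
--         doubled_string += str(int(digit%10))
--     if(carry == 1):
--         doubled_string += '1'
--     return reversed_string(doubled_string)
-- ===== SOURCE B (Python) =====
-- def double_from_string(num_str):
--     ds = [int(c) for c in num_str]
--     body = ''.join(str((2 * d + (1 if nxt >= 5 else 0)) % 10)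
--                    for d, nxt in zip(ds, ds[1:] + [0]))
--     return ('1' + body) if ds and ds[0] >= 5 else body
-- ===== Notes on version B (the rewrite author's own statement) =====
-- stated objective: alternative
-- what changed: Replaces the reverse-the-string, carry-propagating least-significant-first loop (plus final reverse) by a single forward most-significant-first pass that computes each output digit from the current digit and a one-digit lookahead, using the fact that when doubling the carry out of a position is 1 exactly when that digit is >= 5.
import Mathlib
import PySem

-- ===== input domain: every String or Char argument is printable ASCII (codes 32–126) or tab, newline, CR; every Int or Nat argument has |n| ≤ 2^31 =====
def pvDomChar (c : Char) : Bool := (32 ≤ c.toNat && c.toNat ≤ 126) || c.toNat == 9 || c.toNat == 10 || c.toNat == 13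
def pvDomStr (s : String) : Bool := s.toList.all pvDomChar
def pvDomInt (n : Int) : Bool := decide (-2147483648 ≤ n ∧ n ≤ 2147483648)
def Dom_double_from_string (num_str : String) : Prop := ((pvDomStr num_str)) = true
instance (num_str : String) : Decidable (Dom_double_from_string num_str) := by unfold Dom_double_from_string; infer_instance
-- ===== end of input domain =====

-- B replaces A's reverse + carry-propagating loop by a single forward pass with one-digit
-- lookahead (the carry out of a position when doubling is 1 exactly when that digit is ≥ 5);
-- objective: alternative (a genuinely different algorithm of similar cost).


-- ===== PORT A =====
-- a_string[::-1]; step -1 ≠ 0, so the slice always succeeds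
def reversed_string (a_string : String) : String :=
  (PySem.Str.slice? a_string none none (-1)).getD ""

-- int(i) for a one-character string i; none = ValueError, excluded by Pre_double_from_string
def pvCharInt (c : Char) : Int := (PySem.Int.ofChars? [c]).getD 0

def double_from_string (num_str : String) : String :=
  -- doubled_string is kept in its List Char (PySem.Chars) form; '+= str(…)' appends Int.toChars
  let rev := reversed_string num_str
  let st := rev.toList.foldl (fun (st : List Char × Int) i =>
      let digit := 2 * pvCharInt i + st.2
      (st.1 ++ PySem.Int.toChars (PySem.Int.mod digit 10),
       -- int((digit - (digit%10))/10): the float division is exact here, int() truncates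
       PySem.Int.truncdiv (digit - PySem.Int.mod digit 10) 10)) ([], 0)
  let ds := if st.2 = 1 then st.1 ++ ['1'] else st.1
  reversed_string (String.ofList ds)

-- ===== PORT B =====
-- the joined generator of Source B: one output digit per position, lookahead digit from zip(ds, ds[1:]+[0])
def pvBody (ds : List Int) : List Char :=
  ((ds.zip (ds.drop 1 ++ [0])).map (fun p =>
      PySem.Int.toChars (PySem.Int.mod (2 * p.1 + (if 5 ≤ p.2 then 1 else 0)) 10))).flatten

def double_from_string_alt (num_str : String) : String :=
  let ds := num_str.toList.map pvCharInt
  String.ofList (if ds ≠ [] ∧ 5 ≤ ds.headD 0 then '1' :: pvBody ds else pvBody ds)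

-- ===== PRECONDITION & SPEC =====
-- Pre_ excludes exactly the strings containing a non-digit character: on those A's int(i) raises ValueError.
def Pre_double_from_string (num_str : String) : Prop := num_str.toList.all Char.isDigit = true
instance (num_str : String) : Decidable (Pre_double_from_string num_str) := by unfold Pre_double_from_string; infer_instance
def pvWitness_double_from_string : String := "2894"

def Spec_double_from_string (num_str : String) (out : String) : Prop := out = double_from_string_alt num_str
instance (num_str : String) (out : String) : Decidable (Spec_double_from_string num_str out) := by unfold Spec_double_from_string; infer_instance

-- ===== CLAIM (what is proved, stated in full; the proofs are below) =====
def Claim_equal_double_from_string : Prop := ∀ (num_str : String), Dom_double_from_string num_str → Pre_double_from_string num_str → Spec_double_from_string num_str (double_from_string num_str)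

-- ===== LEMMAS AND PROOFS =====

theorem pv_digit_mem (c : Char) (h : c.isDigit = true) :
    c ∈ ['0','1','2','3','4','5','6','7','8','9'] := by
  simp [Char.isDigit] at h
  obtain ⟨h1, h2⟩ := h
  have h1' : 48 ≤ c.val.toNat := UInt32.le_iff_toNat_le.mp h1
  have h2' : c.val.toNat ≤ 57 := UInt32.le_iff_toNat_le.mp h2
  have hval : c.val = 48 ∨ c.val = 49 ∨ c.val = 50 ∨ c.val = 51 ∨ c.val = 52 ∨ c.val = 53
      ∨ c.val = 54 ∨ c.val = 55 ∨ c.val = 56 ∨ c.val = 57 := by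
    interval_cases hc : c.val.toNat <;> simp_all [← UInt32.toNat_inj (a := c.val)]
  rcases hval with h|h|h|h|h|h|h|h|h|h <;>
    (first
      | (have e : c = '0' := Char.ext h) | (have e : c = '1' := Char.ext h)
      | (have e : c = '2' := Char.ext h) | (have e : c = '3' := Char.ext h)
      | (have e : c = '4' := Char.ext h) | (have e : c = '5' := Char.ext h)
      | (have e : c = '6' := Char.ext h) | (have e : c = '7' := Char.ext h)
      | (have e : c = '8' := Char.ext h) | (have e : c = '9' := Char.ext h)) <;>
    subst e <;> decide

theorem pvCharInt_bounds (c : Char) (h : c.isDigit = true) :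
    0 ≤ pvCharInt c ∧ pvCharInt c ≤ 9 := by
  have := pv_digit_mem c h
  fin_cases this <;> decide

-- the loop body of A, on digit values (LSB first), as a foldr step
def pvStep (v : Int) (st : List Char × Int) : List Char × Int :=
  (st.1 ++ PySem.Int.toChars (PySem.Int.mod (2 * v + st.2) 10),
   PySem.Int.truncdiv ((2 * v + st.2) - PySem.Int.mod (2 * v + st.2) 10) 10)

theorem pvBody_cons (v : Int) (t : List Int) :
    pvBody (v :: t) =
      PySem.Int.toChars (PySem.Int.mod (2 * v + (if 5 ≤ t.headD 0 then 1 else 0)) 10) ++ pvBody t := by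
  cases t <;> simp [pvBody]

theorem pv_carry_eq (d : Int) (h0 : 0 ≤ d) (h1 : d ≤ 19) :
    PySem.Int.truncdiv (d - PySem.Int.mod d 10) 10 = if 10 ≤ d then 1 else 0 := by
  interval_cases d <;> decide

theorem pv_toChars_rev (d : Int) (h0 : 0 ≤ d) (h1 : d ≤ 19) :
    (PySem.Int.toChars (PySem.Int.mod d 10)).reverse = PySem.Int.toChars (PySem.Int.mod d 10) := by
  interval_cases d <;> decide

-- main invariant: A's foldr over the digit values produces B's body reversed, and
-- the final carry is 1 exactly when the leading digit is ≥ 5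
theorem pv_loop_eq (vs : List Int) (hd : ∀ v ∈ vs, 0 ≤ v ∧ v ≤ 9) :
    vs.foldr pvStep ([], 0) = ((pvBody vs).reverse, if 5 ≤ vs.headD 0 then 1 else 0) := by
  induction vs with
  | nil => simp [pvBody]
  | cons v t ih =>
    have hv := hd v (List.mem_cons_self ..)
    have ht : ∀ x ∈ t, 0 ≤ x ∧ x ≤ 9 := fun x hx => hd x (List.mem_cons_of_mem _ hx)
    have hhead : 0 ≤ t.headD 0 ∧ t.headD 0 ≤ 9 := by
      cases t with
      | nil => simp
      | cons u t' => exact ht u (List.mem_cons_self ..)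
    set c := if 5 ≤ t.headD 0 then (1:Int) else 0 with hcdef
    have hcb : 0 ≤ c ∧ c ≤ 1 := by rw [hcdef]; split <;> simp
    have hdig0 : 0 ≤ 2 * v + c := by omega
    have hdig1 : 2 * v + c ≤ 19 := by omega
    simp only [List.foldr_cons, ih ht, pvStep, pvBody_cons, List.reverse_append,
      List.headD_cons, ← hcdef]
    rw [pv_toChars_rev _ hdig0 hdig1, pv_carry_eq _ hdig0 hdig1]
    have hiff : (10 ≤ 2 * v + c) ↔ (5 ≤ v) := by omega
    simp [hiff]

theorem double_from_string_spec : Claim_equal_double_from_string := by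
  intro num_str _ hpre
  unfold Spec_double_from_string double_from_string double_from_string_alt reversed_string
  simp only [PySem.Str.slice?_none_none_neg_one, Option.getD_some, String.toList_ofList]
  have hdig : ∀ c ∈ num_str.toList, c.isDigit = true := by
    simpa [Pre_double_from_string, List.all_eq_true] using hpre
  have hvals : ∀ v ∈ num_str.toList.map pvCharInt, 0 ≤ v ∧ v ≤ 9 := by
    intro v hv
    rcases List.mem_map.mp hv with ⟨c, hc, rfl⟩
    exact pvCharInt_bounds c (hdig c hc)
  set cs := num_str.toList with hcs
  set vs := cs.map pvCharInt with hvs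
  have hloop : cs.reverse.foldl (fun (st : List Char × Int) i =>
      (st.1 ++ PySem.Int.toChars (PySem.Int.mod (2 * pvCharInt i + st.2) 10),
       PySem.Int.truncdiv ((2 * pvCharInt i + st.2) - PySem.Int.mod (2 * pvCharInt i + st.2) 10) 10))
      ([], 0) = vs.foldr pvStep ([], 0) := by
    rw [List.foldl_reverse, hvs, List.foldr_map]
    rfl
  rw [hloop, pv_loop_eq vs hvals]
  by_cases hhead : 5 ≤ vs.head?.getD 0
  · have hne : vs ≠ [] := by
      intro he
      rw [he] at hhead
      simp at hhead
    simp [hhead, hne]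
  · simp [hhead]
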